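-- pv_equiv track=rewrite | github.com/gabrielseratti/Python | Teste4/74.py | solve
-- ===== SOURCE A (Python) =====
-- def solve(a,b):
--     contagem = 0
--     lista = ['8', '5', '3']
--     for num in range(a, b):
--         for x in str(num):
--             if x not in lista:
--                 break
--             if str(num).count('8') < str(num).count('5') or str(num).count('5') < str(num).count('3'):
--                 break
--         else:
--             contagem += 1
--     return contagem
-- ===== SOURCE B (Python) =====
-- def solve(a, b):
--     # Enumerate only the numbers whose digits are all in {3,5,8}, level by
--     # level (one decimal digit added per level), instead of scanning [a, b).
--     total = 0
--     d_max = len(str(b)) if b > 0 else 0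
--     level = [0]
--     for _ in range(d_max):
--         level = [10 * n + d for n in level for d in (3, 5, 8)]
--         for n in level:
--             if a <= n < b:
--                 s = str(n)
--                 if s.count('8') >= s.count('5') >= s.count('3'):
--                     total += 1
--     return total
-- ===== Notes on version B (the rewrite author's own statement) =====
-- stated objective: faster
-- what changed: Instead of scanning every integer in [a,b) and inspecting its string, B generates only the numbers whose decimal digits are all in {3,5,8} level-by-level (3^d candidates per digit length) and counts those in range with the digit-count ordering.
import Mathlib
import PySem

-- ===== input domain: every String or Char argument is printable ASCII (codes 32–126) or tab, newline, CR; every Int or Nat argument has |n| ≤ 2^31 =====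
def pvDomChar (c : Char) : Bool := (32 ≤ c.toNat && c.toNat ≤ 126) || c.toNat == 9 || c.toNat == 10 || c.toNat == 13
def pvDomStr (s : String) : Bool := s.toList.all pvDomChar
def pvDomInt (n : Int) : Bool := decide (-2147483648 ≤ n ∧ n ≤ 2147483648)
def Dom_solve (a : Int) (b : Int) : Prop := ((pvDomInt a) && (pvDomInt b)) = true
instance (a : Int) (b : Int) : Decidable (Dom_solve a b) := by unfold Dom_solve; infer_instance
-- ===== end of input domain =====

-- B enumerates only numbers whose decimal digits are all in {3,5,8}, level by level,
-- instead of scanning every integer in [a, b); same return value, asymptotically faster.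

-- ===== PORT A =====
def pvLista : List Char := ['8', '5', '3']

-- 'str(num).count('8') < str(num).count('5') or str(num).count('5') < str(num).count('3')'
def pvCond (s : List Char) : Bool :=
  decide (PySem.Chars.count s ['8'] < PySem.Chars.count s ['5']) ||
  decide (PySem.Chars.count s ['5'] < PySem.Chars.count s ['3'])

-- the inner 'for x in str(num): … break … else:' loop; returns true iff it ends without break
def pvInnerA (full : List Char) : List Char → Bool
  | [] => true
  | x :: rest =>
    if x ∉ pvLista then false
    else if pvCond full then false
    else pvInnerA full rest

def solve (a : Int) (b : Int) : Int :=
  (PySem.List.pyRange a b 1).foldl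
    (fun contagem num =>
      if pvInnerA (PySem.Int.toChars num) (PySem.Int.toChars num) then contagem + 1
      else contagem)
    0

-- ===== PORT B =====
-- 's.count('8') >= s.count('5') >= s.count('3')'
def pvOk (s : List Char) : Bool :=
  decide (PySem.Chars.count s ['5'] ≤ PySem.Chars.count s ['8']) &&
  decide (PySem.Chars.count s ['3'] ≤ PySem.Chars.count s ['5'])

-- 'level = [10 * n + d for n in level for d in (3, 5, 8)]'
def pvStep (level : List Int) : List Int :=
  level.flatMap (fun n => [10 * n + 3, 10 * n + 5, 10 * n + 8])

-- the inner 'for n in level: …' loop of B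
def pvCountLevel (a b total : Int) (level : List Int) : Int :=
  level.foldl
    (fun t n =>
      if a ≤ n ∧ n < b then
        if pvOk (PySem.Int.toChars n) then t + 1 else t
      else t)
    total

def solve_alt (a : Int) (b : Int) : Int :=
  ((List.range (if 0 < b then (PySem.Int.toChars b).length else 0)).foldl
    (fun (st : Int × List Int) _ =>
      let level := pvStep st.2
      (pvCountLevel a b st.1 level, level))
    (0, [0])).1

-- ===== PRECONDITION & SPEC =====
def Spec_solve (a : Int) (b : Int) (out : Int) : Prop := out = solve_alt a b
instance (a : Int) (b : Int) (out : Int) : Decidable (Spec_solve a b out) := by unfold Spec_solve; infer_instance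

-- ===== CLAIM (what is proved, stated in full; the proofs are below) =====
def Claim_equal_solve : Prop := ∀ (a : Int) (b : Int), Dom_solve a b → Spec_solve a b (solve a b)

-- ===== LEMMAS AND PROOFS =====

-- decimal digits of a natural number, most significant first (= Nat.toDigits 10)
def pvRep (n : Nat) : List Char :=
  if h : n < 10 then [Nat.digitChar n]
  else pvRep (n / 10) ++ [Nat.digitChar (n % 10)]
  decreasing_by exact Nat.div_lt_self (by omega) (by omega)

theorem pvRep_low {n : Nat} (h : n < 10) : pvRep n = [Nat.digitChar n] := by
  rw [pvRep]; simp [h]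

theorem pvRep_high {n : Nat} (h : 10 ≤ n) :
    pvRep n = pvRep (n / 10) ++ [Nat.digitChar (n % 10)] := by
  rw [pvRep]; simp [Nat.not_lt.mpr h]

theorem pvRep_ne_nil (n : Nat) : pvRep n ≠ [] := by
  by_cases h : n < 10
  · rw [pvRep_low h]; simp
  · rw [pvRep_high (by omega)]; simp

theorem pvToDigitsCore_eq : ∀ (f n : Nat) (acc : List Char), n < f →
    Nat.toDigitsCore 10 f n acc = pvRep n ++ acc := by
  intro f
  induction f with
  | zero => intro n acc h; omega
  | succ f ih =>
    intro n acc h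
    by_cases h10 : n < 10
    · have hd : n / 10 = 0 := Nat.div_eq_of_lt h10
      simp [Nat.toDigitsCore, hd, pvRep_low h10, Nat.mod_eq_of_lt h10]
    · have hd : n / 10 ≠ 0 := by
        intro hc; exact h10 (Nat.lt_of_div_eq_zero (by omega) hc)
      have hlt : n / 10 < f := by
        have := Nat.div_lt_self (by omega : 0 < n) (by omega : 1 < 10)
        omega
      simp only [Nat.toDigitsCore, hd, if_false]
      rw [ih _ _ hlt, pvRep_high (n := n) (by omega)]
      simp

theorem pvToChars_of_nonneg {n : Int} (h : 0 ≤ n) :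
    PySem.Int.toChars n = pvRep n.toNat := by
  simp only [PySem.Int.toChars, if_neg (by omega : ¬ n < 0), Nat.toDigits]
  rw [pvToDigitsCore_eq _ _ _ (Nat.lt_succ_self _)]
  simp

theorem pvToChars_of_neg {n : Int} (h : n < 0) :
    PySem.Int.toChars n = '-' :: Nat.toDigits 10 n.natAbs := by
  simp [PySem.Int.toChars, h]

def pvAllMem (s : List Char) : Bool := s.all (fun c => decide (c ∈ pvLista))

theorem pvOk_eq_not_cond (s : List Char) : pvOk s = !pvCond s := by
  simp only [pvOk, pvCond, Bool.not_or]
  by_cases h1 : PySem.Chars.count s ['8'] < PySem.Chars.count s ['5'] <;>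
    by_cases h2 : PySem.Chars.count s ['5'] < PySem.Chars.count s ['3'] <;>
      simp [h1, h2] <;> omega

theorem pvInnerA_of_cond_false {full : List Char} (h : pvCond full = false) :
    ∀ cs, pvInnerA full cs = pvAllMem cs := by
  intro cs
  induction cs with
  | nil => simp [pvInnerA, pvAllMem]
  | cons x rest ih =>
    by_cases hx : x ∈ pvLista
    · simp [pvInnerA, hx, h, ih, pvAllMem]
    · simp [pvInnerA, hx, pvAllMem]

theorem pvInnerA_of_cond_true {full : List Char} (h : pvCond full = true)
    {x : Char} {rest : List Char} : pvInnerA full (x :: rest) = false := by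
  by_cases hx : x ∈ pvLista <;> simp [pvInnerA, hx, h]

theorem pvToChars_ne_nil (n : Int) : PySem.Int.toChars n ≠ [] := by
  by_cases h : n < 0
  · rw [pvToChars_of_neg h]; simp
  · rw [pvToChars_of_nonneg (by omega)]; exact pvRep_ne_nil _

theorem pvGoodA_iff (num : Int) :
    pvInnerA (PySem.Int.toChars num) (PySem.Int.toChars num) =
      (pvAllMem (PySem.Int.toChars num) && pvOk (PySem.Int.toChars num)) := by
  cases hc : pvCond (PySem.Int.toChars num) with
  | false =>
    rw [pvInnerA_of_cond_false hc, pvOk_eq_not_cond, hc]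
    simp
  | true =>
    obtain ⟨x, rest, hx⟩ : ∃ x rest, PySem.Int.toChars num = x :: rest := by
      cases h : PySem.Int.toChars num with
      | nil => exact absurd h (pvToChars_ne_nil num)
      | cons x rest => exact ⟨x, rest, rfl⟩
    rw [pvOk_eq_not_cond, hc]
    rw [hx] at hc ⊢
    rw [pvInnerA_of_cond_true hc]
    simp

theorem solve_eq_countP (a b : Int) :
    solve a b = ((PySem.List.pyRange a b 1).countP
      (fun num => pvAllMem (PySem.Int.toChars num) && pvOk (PySem.Int.toChars num)) : Int) := by
  unfold solve
  rw [PySem.List.foldl_if_add_one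
      (p := fun num => pvInnerA (PySem.Int.toChars num) (PySem.Int.toChars num))]
  rw [List.countP_congr (fun x _ => by rw [pvGoodA_iff x])]
  simp

-- ----- B side -----
def pvLevel : Nat → List Int
  | 0 => [0]
  | k + 1 => pvStep (pvLevel k)

def pvLevels : Nat → List Int
  | 0 => []
  | m + 1 => pvLevels m ++ pvLevel (m + 1)

def pvQ (a b n : Int) : Bool := decide (a ≤ n ∧ n < b) && pvOk (PySem.Int.toChars n)

theorem pvCountLevel_eq (a b t : Int) (lvl : List Int) :
    pvCountLevel a b t lvl = t + ((lvl.countP (pvQ a b) : Nat) : Int) := by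
  unfold pvCountLevel
  have hfn : (fun (t : Int) (n : Int) =>
      if a ≤ n ∧ n < b then
        if pvOk (PySem.Int.toChars n) then t + 1 else t
      else t) = (fun t n => if pvQ a b n then t + 1 else t) := by
    funext t n
    by_cases h1 : a ≤ n ∧ n < b <;> cases h2 : pvOk (PySem.Int.toChars n) <;>
      simp [pvQ, h1, h2]
  rw [hfn, PySem.List.foldl_if_add_one]

theorem solve_alt_fold (a b : Int) : ∀ m : Nat,
    (List.range m).foldl
      (fun (st : Int × List Int) _ =>
        let level := pvStep st.2
        (pvCountLevel a b st.1 level, level))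
      (0, [0]) = ((((pvLevels m).countP (pvQ a b) : Nat) : Int), pvLevel m) := by
  intro m
  induction m with
  | zero => simp [pvLevels, pvLevel]
  | succ m ih =>
    rw [List.range_succ, List.foldl_append, ih]
    simp only [List.foldl_cons, List.foldl_nil]
    have h1 : pvStep (pvLevel m) = pvLevel (m + 1) := rfl
    rw [h1, pvCountLevel_eq]
    have h2 : pvLevels (m + 1) = pvLevels m ++ pvLevel (m + 1) := rfl
    rw [h2, List.countP_append]
    simp only [Prod.mk.injEq]
    exact ⟨by push_cast; ring, by simp⟩

theorem solve_alt_eq (a b : Int) :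
    solve_alt a b = (((pvLevels (if 0 < b then (PySem.Int.toChars b).length else 0)).countP
      (pvQ a b) : Nat) : Int) := by
  unfold solve_alt
  rw [solve_alt_fold]

-- ----- digit characterisation of the levels -----
theorem pvDigitChar_mem {r : Nat} (h : r < 10) :
    Nat.digitChar r ∈ pvLista ↔ (r = 3 ∨ r = 5 ∨ r = 8) := by
  interval_cases r <;> decide

theorem pvRep_length_one {m : Nat} (h : (pvRep m).length = 1) : m < 10 := by
  by_contra hc
  rw [pvRep_high (by omega)] at h
  have h0 : (pvRep (m / 10)).length = 0 := by simpa using h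
  exact pvRep_ne_nil (m / 10) (List.length_eq_zero_iff.mp h0)

theorem pvMem_level_succ : ∀ (k : Nat) (n : Int),
    n ∈ pvLevel (k + 1) ↔
      ∃ m : Nat, n = (m : Int) ∧ 0 < m ∧ (pvRep m).length = k + 1 ∧ pvAllMem (pvRep m) = true := by
  intro k
  induction k with
  | zero =>
    intro n
    constructor
    · intro hn
      have : n = 3 ∨ n = 5 ∨ n = 8 := by
        simp [pvLevel, pvStep, List.mem_flatMap] at hn
        omega
      rcases this with h | h | h <;> subst h
      · exact ⟨3, by norm_num, by norm_num, by rw [pvRep_low (by norm_num)]; decide⟩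
      · exact ⟨5, by norm_num, by norm_num, by rw [pvRep_low (by norm_num)]; decide⟩
      · exact ⟨8, by norm_num, by norm_num, by rw [pvRep_low (by norm_num)]; decide⟩
    · rintro ⟨m, rfl, hm, hlen, hall⟩
      have h10 : m < 10 := pvRep_length_one hlen
      rw [pvRep_low h10] at hall
      have : Nat.digitChar m ∈ pvLista := by
        simpa [pvAllMem] using hall
      have := (pvDigitChar_mem h10).mp this
      simp [pvLevel, pvStep, List.mem_flatMap]
      omega
  | succ k ih =>
    intro n
    have hstep : pvLevel (k + 2) = pvStep (pvLevel (k + 1)) := rfl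
    rw [hstep]
    constructor
    · intro hn
      simp only [pvStep, List.mem_flatMap] at hn
      obtain ⟨p, hp, hnp⟩ := hn
      obtain ⟨m', rfl, hm', hlen', hall'⟩ := (ih p).mp hp
      have hd : ∃ d : Nat, (d = 3 ∨ d = 5 ∨ d = 8) ∧ n = ((10 * m' + d : Nat) : Int) := by
        simp only [List.mem_cons, List.not_mem_nil, or_false] at hnp
        rcases hnp with h | h | h
        · exact ⟨3, by norm_num, by subst h; push_cast; ring⟩
        · exact ⟨5, by norm_num, by subst h; push_cast; ring⟩
        · exact ⟨8, by norm_num, by subst h; push_cast; ring⟩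
      obtain ⟨d, hd358, rfl⟩ := hd
      refine ⟨10 * m' + d, rfl, by omega, ?_, ?_⟩
      · rw [pvRep_high (by omega)]
        have hdiv : (10 * m' + d) / 10 = m' := by omega
        have hmod : (10 * m' + d) % 10 = d := by omega
        rw [hdiv]
        simp [hlen']
      · rw [pvRep_high (by omega)]
        have hdiv : (10 * m' + d) / 10 = m' := by omega
        have hmod : (10 * m' + d) % 10 = d := by omega
        rw [hdiv, hmod]
        simp only [pvAllMem, List.all_append, Bool.and_eq_true] at hall' ⊢
        refine ⟨hall', ?_⟩
        simp [List.all_cons, (pvDigitChar_mem (by omega)).mpr hd358]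
    · rintro ⟨m, rfl, hm, hlen, hall⟩
      have h10 : 10 ≤ m := by
        by_contra hc
        rw [pvRep_low (by omega)] at hlen
        simp at hlen
      rw [pvRep_high h10] at hlen hall
      simp only [List.length_append, List.length_cons, List.length_nil] at hlen
      simp only [pvAllMem, List.all_append, Bool.and_eq_true] at hall
      obtain ⟨hall1, hall2⟩ := hall
      have hd : m % 10 = 3 ∨ m % 10 = 5 ∨ m % 10 = 8 := by
        apply (pvDigitChar_mem (by omega)).mp
        simpa [List.all_cons] using hall2
      have hq : 0 < m / 10 := by omega
      have hin : ((m / 10 : Nat) : Int) ∈ pvLevel (k + 1) :=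
        (ih _).mpr ⟨m / 10, rfl, hq, by omega, hall1⟩
      simp only [pvStep, List.mem_flatMap]
      refine ⟨((m / 10 : Nat) : Int), hin, ?_⟩
      have hms : (m : Int) = 10 * ((m / 10 : Nat) : Int) + ((m % 10 : Nat) : Int) := by
        push_cast
        omega
      simp only [List.mem_cons, List.not_mem_nil, or_false]
      rcases hd with h | h | h <;> rw [hms, h] <;> simp

theorem pvRep_lt_pow : ∀ m : Nat, m < 10 ^ (pvRep m).length := by
  intro m
  induction m using Nat.strong_induction_on with
  | _ m ih =>
    by_cases h : m < 10
    · rw [pvRep_low h]; simpa using h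
    · rw [pvRep_high (by omega)]
      have hlt := ih (m / 10) (Nat.div_lt_self (by omega) (by omega))
      simp only [List.length_append, List.length_cons, List.length_nil]
      calc m = 10 * (m / 10) + m % 10 := by omega
        _ < 10 * 10 ^ (pvRep (m / 10)).length := by omega
        _ = 10 ^ ((pvRep (m / 10)).length + (0 + 1)) := by ring
  -- (the last step's exponent matches the simp-normalised length)

theorem pvRep_length_le : ∀ (m k : Nat), 0 < k → m < 10 ^ k → (pvRep m).length ≤ k := by
  intro m
  induction m using Nat.strong_induction_on with
  | _ m ih =>
    intro k hk hm
    by_cases h : m < 10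
    · rw [pvRep_low h]; simpa using hk
    · have hk2 : 2 ≤ k := by
        by_contra hc
        have : k = 1 := by omega
        subst this
        simp at hm
        omega
      rw [pvRep_high (by omega)]
      have hdiv : m / 10 < 10 ^ (k - 1) := by
        have h1 : m < 10 ^ (k - 1) * 10 := by
          have : 10 ^ (k - 1) * 10 = 10 ^ k := by
            rw [← pow_succ]
            congr 1
            omega
          omega
        omega
      have := ih (m / 10) (Nat.div_lt_self (by omega) (by omega)) (k - 1) (by omega) hdiv
      simp only [List.length_append, List.length_cons, List.length_nil]
      omega

theorem pvMem_levels : ∀ (M : Nat) (n : Int),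
    n ∈ pvLevels M ↔
      ∃ m : Nat, n = (m : Int) ∧ 0 < m ∧ (pvRep m).length ≤ M ∧ pvAllMem (pvRep m) = true := by
  intro M
  induction M with
  | zero =>
    intro n
    simp only [pvLevels, List.not_mem_nil, false_iff]
    rintro ⟨m, rfl, hm, hlen, -⟩
    have := pvRep_ne_nil m
    have : 0 < (pvRep m).length := List.length_pos_iff.mpr this
    omega
  | succ M ih =>
    intro n
    have : pvLevels (M + 1) = pvLevels M ++ pvLevel (M + 1) := rfl
    rw [this, List.mem_append, ih, pvMem_level_succ]
    constructor
    · rintro (⟨m, rfl, hm, hlen, hall⟩ | ⟨m, rfl, hm, hlen, hall⟩)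
      · exact ⟨m, rfl, hm, by omega, hall⟩
      · exact ⟨m, rfl, hm, by omega, hall⟩
    · rintro ⟨m, rfl, hm, hlen, hall⟩
      by_cases h : (pvRep m).length ≤ M
      · exact Or.inl ⟨m, rfl, hm, h, hall⟩
      · exact Or.inr ⟨m, rfl, hm, by omega, hall⟩

theorem pvNodup_level : ∀ k : Nat, (pvLevel k).Nodup := by
  intro k
  induction k with
  | zero => simp [pvLevel]
  | succ k ih =>
    have : pvLevel (k + 1) = pvStep (pvLevel k) := rfl
    rw [this]
    unfold pvStep
    rw [List.nodup_flatMap]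
    constructor
    · intro x _
      simp only [List.nodup_cons, List.mem_cons, List.not_mem_nil, List.nodup_nil]
      refine ⟨by intro h; rcases h with h | h | h <;> omega, by intro h; rcases h with h | h <;> omega, by simp⟩
    · refine List.Pairwise.imp ?_ ih
      intro p q hpq
      intro x hx hx'
      simp only [List.mem_cons, List.not_mem_nil, or_false] at hx hx'
      omega

theorem pvNodup_levels : ∀ M : Nat, (pvLevels M).Nodup := by
  intro M
  induction M with
  | zero => simp [pvLevels]
  | succ M ih =>
    have : pvLevels (M + 1) = pvLevels M ++ pvLevel (M + 1) := rfl
    rw [this, List.nodup_append]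
    refine ⟨ih, pvNodup_level _, ?_⟩
    intro x hx y hy
    obtain ⟨m, rfl, hm, hlen, -⟩ := (pvMem_levels M x).mp hx
    obtain ⟨m', rfl, hm', hlen', -⟩ := (pvMem_level_succ M y).mp hy
    intro heq
    have hmm : m = m' := by exact_mod_cast heq
    rw [← hmm] at hlen'
    omega

-- the bridge: within [a, b), A's membership test selects exactly the members of B's levels
theorem pvAllMem_iff_mem_levels {a b x : Int} (h1 : a ≤ x) (h2 : x < b) :
    pvAllMem (PySem.Int.toChars x) = true ↔
      x ∈ pvLevels (if 0 < b then (PySem.Int.toChars b).length else 0) := by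
  constructor
  · intro hall
    have hxpos : 0 < x := by
      by_contra hc
      push_neg at hc
      rcases lt_or_eq_of_le hc with hlt | heq
      · rw [pvToChars_of_neg hlt] at hall
        simp [pvAllMem, List.all_cons, pvLista] at hall
      · subst heq
        rw [pvToChars_of_nonneg le_rfl] at hall
        simp only [Int.toNat_zero] at hall
        rw [pvRep_low (by norm_num)] at hall
        exact absurd hall (by decide)
    have hbpos : 0 < b := by omega
    rw [if_pos hbpos]
    rw [pvToChars_of_nonneg (le_of_lt hxpos)] at hall
    rw [pvToChars_of_nonneg (le_of_lt hbpos)]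
    rw [pvMem_levels]
    refine ⟨x.toNat, by omega, by omega, ?_, hall⟩
    apply pvRep_length_le
    · exact List.length_pos_iff.mpr (pvRep_ne_nil _)
    · have hb : b.toNat < 10 ^ (pvRep b.toNat).length := pvRep_lt_pow _
      have : x.toNat < b.toNat := by omega
      omega
  · intro hmem
    by_cases hbpos : 0 < b
    · rw [if_pos hbpos, pvMem_levels] at hmem
      obtain ⟨m, rfl, hm, -, hall⟩ := hmem
      rwa [pvToChars_of_nonneg (by exact_mod_cast Nat.zero_le m)]
    · rw [if_neg hbpos] at hmem
      simp [pvLevels] at hmem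

-- ===== VERDICT (by name: the statement is the Claim_ definition above) =====
theorem solve_spec : Claim_equal_solve := by
  intro a b _
  unfold Spec_solve
  rw [solve_eq_countP, solve_alt_eq]
  norm_cast
  rw [List.countP_eq_length_filter, List.countP_eq_length_filter]
  apply List.Perm.length_eq
  rw [List.perm_ext_iff_of_nodup
    ((PySem.List.nodup_pyRange_one a b).filter _)
    ((pvNodup_levels _).filter _)]
  intro x
  simp only [List.mem_filter, PySem.List.mem_pyRange_one, pvQ, Bool.and_eq_true,
    decide_eq_true_eq]
  constructor
  · rintro ⟨⟨h1, h2⟩, hall, hok⟩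
    exact ⟨(pvAllMem_iff_mem_levels h1 h2).mp hall, ⟨h1, h2⟩, hok⟩
  · rintro ⟨hmem, ⟨h1, h2⟩, hok⟩
    exact ⟨⟨h1, h2⟩, (pvAllMem_iff_mem_levels h1 h2).mpr hmem, hok⟩
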